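-- pv_equiv track=rewrite | github.com/marvelousakinyemi910-commits/Python-Repository | list/morning_coffee.py | check_if_sum_of_each_digits_is_a_prime_number
-- ===== SOURCE A (Python) =====
-- def prime_number(number):
--
--         if number <= 1:
--             return False
--         for factor in range(2,number):
--             if number % factor == 0:
--                 return False
--
--
--         return True
--
-- def check_if_sum_of_each_digits_is_a_prime_number(numbers):
--     digits = []
--     for num in numbers:
--         total = 0
--         temp = num
--         while temp > 0:
--             total += temp % 10
--             temp //= 10
--         if prime_number(total):
--             digits.append(num)
--     return digits
-- ===== SOURCE B (Python) =====
-- def check_if_sum_of_each_digits_is_a_prime_number(numbers):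
--     def digit_sum(n):
--         return 0 if n <= 0 else n % 10 + digit_sum(n // 10)
--     sums = [digit_sum(n) for n in numbers]
--     if not sums:
--         return []
--     m = max(sums)
--     is_prime = [True] * (m + 1)
--     is_prime[0] = False
--     if m >= 1:
--         is_prime[1] = False
--     for p in range(2, m + 1):
--         for q in range(2 * p, m + 1, p):
--             is_prime[q] = False
--     return [n for n, s in zip(numbers, sums) if is_prime[s]]
-- ===== Notes on version B (the rewrite author's own statement) =====
-- stated objective: alternative
-- what changed: Replaces per-number trial-division primality testing with a single Sieve-of-Eratosthenes-style boolean table built once up to the maximum digit-sum, followed by one selection pass over the numbers (digit sums computed recursively instead of a while loop).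
import Mathlib
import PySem

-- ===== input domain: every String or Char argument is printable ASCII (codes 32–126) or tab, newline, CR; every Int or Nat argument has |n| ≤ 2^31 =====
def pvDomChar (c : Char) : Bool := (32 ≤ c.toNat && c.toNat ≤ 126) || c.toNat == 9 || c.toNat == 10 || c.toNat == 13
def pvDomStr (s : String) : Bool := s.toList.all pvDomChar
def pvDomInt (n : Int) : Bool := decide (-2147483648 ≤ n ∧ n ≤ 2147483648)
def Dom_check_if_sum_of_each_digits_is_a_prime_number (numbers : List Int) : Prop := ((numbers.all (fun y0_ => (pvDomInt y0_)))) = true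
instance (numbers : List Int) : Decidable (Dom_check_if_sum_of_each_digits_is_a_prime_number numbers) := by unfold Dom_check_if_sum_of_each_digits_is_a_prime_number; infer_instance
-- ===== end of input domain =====

-- B replaces A's per-number trial-division primality test by one sieve table built up to the
-- maximum digit-sum plus a selection pass (alternative algorithm, same return values).

-- ===== PORT A =====
-- 'for factor in range(2, number): if number % factor == 0: return False / return True'
def primeLoop (number : Int) : List Int → Bool
  | [] => true
  | f :: rest => if PySem.Int.mod number f = 0 then false else primeLoop number rest

def prime_number (number : Int) : Bool :=
  if number ≤ 1 then false
  else primeLoop number (PySem.List.pyRange 2 number 1)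

-- 'while temp > 0: total += temp % 10; temp //= 10'
def dsumLoop (total temp : Int) : Int :=
  if h : 0 < temp then
    dsumLoop (total + PySem.Int.mod temp 10) (PySem.Int.floordiv temp 10)
  else total
termination_by temp.toNat
decreasing_by
  have h10 : (0:Int) < 10 := by norm_num
  have h1 : PySem.Int.floordiv temp 10 < temp :=
    (PySem.Int.floordiv_lt_iff_lt_mul h10).mpr (by linarith)
  have h2 : 0 ≤ PySem.Int.floordiv temp 10 :=
    (PySem.Int.le_floordiv_iff_mul_le h10).mpr (by linarith)
  omega

def check_if_sum_of_each_digits_is_a_prime_number (numbers : List Int) : List Int :=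
  numbers.foldl
    (fun digits num =>
      if prime_number (dsumLoop 0 num) then digits ++ [num] else digits) []

-- ===== PORT B =====
-- 'return 0 if n <= 0 else n % 10 + digit_sum(n // 10)'
def digit_sum (n : Int) : Int :=
  if h : n ≤ 0 then 0
  else PySem.Int.mod n 10 + digit_sum (PySem.Int.floordiv n 10)
termination_by n.toNat
decreasing_by
  have h10 : (0:Int) < 10 := by norm_num
  have h1 : PySem.Int.floordiv n 10 < n :=
    (PySem.Int.floordiv_lt_iff_lt_mul h10).mpr (by omega)
  have h2 : 0 ≤ PySem.Int.floordiv n 10 :=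
    (PySem.Int.le_floordiv_iff_mul_le h10).mpr (by omega)
  omega

-- the sieve: is_prime[0] = is_prime[1] = False, then cross out every multiple q of every p.
-- The crossed indices satisfy 0 ≤ q ≤ m, so '.set q.toNat false' is exact for 'is_prime[q] = False'.
def sieve (m : Int) : List Bool :=
  let f1 := (List.replicate (m + 1).toNat true).set 0 false
  let f2 := if 1 ≤ m then f1.set 1 false else f1
  (PySem.List.pyRange 2 (m + 1) 1).foldl
    (fun fl p =>
      (PySem.List.pyRange (2 * p) (m + 1) p).foldl (fun fl q => fl.set q.toNat false) fl)
    f2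

def check_if_sum_of_each_digits_is_a_prime_number_alt (numbers : List Int) : List Int :=
  let sums := numbers.map digit_sum
  if sums.isEmpty then []
  else
    -- max(sums): sums is nonempty here, so max? is some and the .getD default is never used
    let m := (PySem.List.max? sums (fun x => x)).getD 0
    let isp := sieve m
    -- '[n for n, s in zip(numbers, sums) if is_prime[s]]'; 0 ≤ s ≤ m, so the index is in range
    (numbers.zip sums).filterMap (fun p => if isp.getD p.2.toNat false then some p.1 else none)

-- ===== PRECONDITION & SPEC =====
def Spec_check_if_sum_of_each_digits_is_a_prime_number (numbers : List Int) (out : List Int) : Prop := out = check_if_sum_of_each_digits_is_a_prime_number_alt numbers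
instance (numbers : List Int) (out : List Int) : Decidable (Spec_check_if_sum_of_each_digits_is_a_prime_number numbers out) := by unfold Spec_check_if_sum_of_each_digits_is_a_prime_number; infer_instance

-- ===== CLAIM (what is proved, stated in full; the proofs are below) =====
def Claim_equal_check_if_sum_of_each_digits_is_a_prime_number : Prop := ∀ (numbers : List Int), Dom_check_if_sum_of_each_digits_is_a_prime_number numbers → Spec_check_if_sum_of_each_digits_is_a_prime_number numbers (check_if_sum_of_each_digits_is_a_prime_number numbers)

-- ===== LEMMAS AND PROOFS =====

-- A's while-loop digit sum equals B's recursive digit sum.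
theorem dsumLoop_eq (total temp : Int) : dsumLoop total temp = total + digit_sum temp := by
  rw [dsumLoop, digit_sum]
  by_cases h : 0 < temp
  · rw [dif_pos h, dif_neg (by omega : ¬ temp ≤ 0), dsumLoop_eq]
    ring
  · rw [dif_neg h, dif_pos (by omega : temp ≤ 0)]
    ring
termination_by temp.toNat
decreasing_by
  have h10 : (0:Int) < 10 := by norm_num
  have h1 : PySem.Int.floordiv temp 10 < temp :=
    (PySem.Int.floordiv_lt_iff_lt_mul h10).mpr (by linarith)
  have h2 : 0 ≤ PySem.Int.floordiv temp 10 :=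
    (PySem.Int.le_floordiv_iff_mul_le h10).mpr (by linarith)
  omega

theorem digit_sum_nonneg (n : Int) : 0 ≤ digit_sum n := by
  rw [digit_sum]
  by_cases h : n ≤ 0
  · rw [dif_pos h]
  · rw [dif_neg h]
    have h1 := PySem.Int.mod_nonneg n (b := 10) (by norm_num)
    have h2 := digit_sum_nonneg (PySem.Int.floordiv n 10)
    omega
termination_by n.toNat
decreasing_by
  have h10 : (0:Int) < 10 := by norm_num
  have h1 : PySem.Int.floordiv n 10 < n :=
    (PySem.Int.floordiv_lt_iff_lt_mul h10).mpr (by omega)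
  have h2 : 0 ≤ PySem.Int.floordiv n 10 :=
    (PySem.Int.le_floordiv_iff_mul_le h10).mpr (by omega)
  omega

theorem primeLoop_eq_true_iff (n : Int) (L : List Int) :
    primeLoop n L = true ↔ ∀ f ∈ L, PySem.Int.mod n f ≠ 0 := by
  induction L with
  | nil => simp [primeLoop]
  | cons f rest ih =>
    simp only [primeLoop, List.mem_cons]
    by_cases h : PySem.Int.mod n f = 0
    · simp [h]
    · simp [h, ih]

-- a fold of in-range boolean crossings, characterised entrywise
theorem foldl_set_length (L : List Int) (flags : List Bool) :
    (L.foldl (fun fl q => fl.set q.toNat false) flags).length = flags.length := by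
  induction L generalizing flags with
  | nil => rfl
  | cons q rest ih => simp [List.foldl_cons, ih, List.length_set]

theorem foldl_set_get (L : List Int) (flags : List Bool) (i : Nat) (hi : i < flags.length) :
    (L.foldl (fun fl q => fl.set q.toNat false) flags)[i]? =
      if L.any (fun q => q.toNat == i) then some false else flags[i]? := by
  induction L generalizing flags with
  | nil => simp
  | cons q rest ih =>
    simp only [List.foldl_cons, List.any_cons]
    rw [ih (flags.set q.toNat false) (by simpa using hi)]
    by_cases hq : q.toNat = i
    · subst hq
      by_cases hr : rest.any (fun x => x.toNat == q.toNat)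
      · simp [hr]
      · simp [hr, List.getElem?_set_self hi]
    · by_cases hr : rest.any (fun x => x.toNat == i)
      · simp [hq, hr]
      · simp [hq, hr, List.getElem?_set_ne hq]

theorem outer_set_get (P : List Int) (m : Int) (flags : List Bool) (i : Nat)
    (hi : i < flags.length) :
    (P.foldl (fun fl p =>
        (PySem.List.pyRange (2 * p) (m + 1) p).foldl (fun fl q => fl.set q.toNat false) fl)
      flags)[i]? =
      if P.any (fun p => (PySem.List.pyRange (2 * p) (m + 1) p).any (fun q => q.toNat == i))
      then some false else flags[i]? := by
  induction P generalizing flags with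
  | nil => simp
  | cons p rest ih =>
    simp only [List.foldl_cons, List.any_cons]
    rw [ih _ (by simpa [foldl_set_length] using hi),
        foldl_set_get _ flags i hi]
    by_cases hp : (PySem.List.pyRange (2 * p) (m + 1) p).any (fun q => q.toNat == i)
    · by_cases hr : rest.any (fun p' => (PySem.List.pyRange (2 * p') (m + 1) p').any (fun q => q.toNat == i))
      · simp [hp, hr]
      · simp [hp, hr]
    · by_cases hr : rest.any (fun p' => (PySem.List.pyRange (2 * p') (m + 1) p').any (fun q => q.toNat == i))
      · simp [hp, hr]
      · simp [hp, hr]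

-- the sieve entry at a digit-sum index is exactly A's trial-division verdict
theorem sieve_get (m s : Int) (h0 : 0 ≤ s) (hs : s ≤ m) :
    (sieve m)[s.toNat]? = some (prime_number s) := by
  have hm : 0 ≤ m := le_trans h0 hs
  simp only [sieve]
  have hlen : s.toNat <
      (if 1 ≤ m then ((List.replicate (m + 1).toNat true).set 0 false).set 1 false
       else (List.replicate (m + 1).toNat true).set 0 false).length := by
    split <;> simp <;> omega
  rw [outer_set_get _ _ _ _ hlen]
  have hinit :
      (if 1 ≤ m then ((List.replicate (m + 1).toNat true).set 0 false).set 1 false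
       else (List.replicate (m + 1).toNat true).set 0 false)[s.toNat]? =
      some (decide (2 ≤ s)) := by
    have hsn : s.toNat < (m + 1).toNat := by omega
    by_cases h2 : 2 ≤ s
    · have hne0 : (0:Nat) ≠ s.toNat := by omega
      have hne1 : (1:Nat) ≠ s.toNat := by omega
      split
      · rw [List.getElem?_set_ne hne1, List.getElem?_set_ne hne0]
        simp [hsn, h2]
      · rw [List.getElem?_set_ne hne0]
        simp [hsn, h2]
    · have hs01 : s = 0 ∨ s = 1 := by omega
      rcases hs01 with h | h
      · have hz : s.toNat = 0 := by omega
        rw [hz]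
        split
        · rw [List.getElem?_set_ne (by omega : (1:Nat) ≠ 0),
              List.getElem?_set_self (by simpa using (by omega : (0:Nat) < (m+1).toNat))]
          simp [h2]
        · rw [List.getElem?_set_self (by simpa using (by omega : (0:Nat) < (m+1).toNat))]
          simp [h2]
      · have hz : s.toNat = 1 := by omega
        have hm1 : 1 ≤ m := by omega
        rw [hz, if_pos hm1,
            List.getElem?_set_self (by simp [List.length_set]; omega)]
        simp [h2]
  by_cases hmk : (PySem.List.pyRange 2 (m + 1) 1).any
      (fun p => (PySem.List.pyRange (2 * p) (m + 1) p).any (fun q => q.toNat == s.toNat)) = true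
  · rw [if_pos hmk]
    -- some composite q = s is crossed out: extract a proper divisor and refute the trial loop
    obtain ⟨p, hpmem, hq⟩ := List.any_eq_true.mp hmk
    obtain ⟨q, hqmem, hqi⟩ := List.any_eq_true.mp hq
    have hp : 2 ≤ p ∧ p < m + 1 := (PySem.List.mem_pyRange_one).mp hpmem
    have hqr := (PySem.List.mem_pyRange_iff_of_pos (by omega : 0 < p) q).mp hqmem
    obtain ⟨hq1, hq2, k, hk⟩ := hqr
    have hq0 : 0 ≤ q := by omega
    have hqs : q = s := by
      have hqn : q.toNat = s.toNat := by simpa using hqi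
      omega
    subst hqs
    have hdvd : p ∣ q := ⟨k + 2, by linarith⟩
    have hps : p < q := by omega
    congr 1
    rw [prime_number, if_neg (by omega : ¬ q ≤ 1)]
    by_contra hpl
    have hpl' : primeLoop q (PySem.List.pyRange 2 q 1) = true := by
      revert hpl; cases primeLoop q (PySem.List.pyRange 2 q 1) <;> simp
    exact (primeLoop_eq_true_iff q _).mp hpl' p
      ((PySem.List.mem_pyRange_one).mpr ⟨hp.1, hps⟩)
      ((PySem.Int.mod_eq_zero_iff_dvd q p).mpr hdvd)
  · rw [if_neg hmk, hinit]
    congr 1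
    by_cases h2 : 2 ≤ s
    · -- not crossed out: no proper divisor exists, so the trial loop returns True
      rw [prime_number, if_neg (by omega : ¬ s ≤ 1)]
      have : primeLoop s (PySem.List.pyRange 2 s 1) = true := by
        rw [primeLoop_eq_true_iff]
        intro f hf hmod
        have hfr : 2 ≤ f ∧ f < s := (PySem.List.mem_pyRange_one).mp hf
        have hfd : f ∣ s := (PySem.Int.mod_eq_zero_iff_dvd s f).mp hmod
        obtain ⟨c, hc⟩ := hfd
        have hc2 : 2 ≤ c := by nlinarith
        have h2f : 2 * f ≤ s := by nlinarith
        apply hmk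
        apply List.any_eq_true.mpr
        refine ⟨f, (PySem.List.mem_pyRange_one).mpr ⟨hfr.1, by omega⟩, ?_⟩
        apply List.any_eq_true.mpr
        refine ⟨s, (PySem.List.mem_pyRange_iff_of_pos (by omega) s).mpr
          ⟨h2f, by omega, ⟨c - 2, by ring_nf; nlinarith⟩⟩, by simp⟩
      simp [this, h2]
    · rw [prime_number, if_pos (by omega : s ≤ 1)]
      simp [h2]

theorem zip_filterMap_eq_filter (l : List Int) (q : Int → Bool) :
    ((l.zip (l.map digit_sum)).filterMap
        (fun p => if q p.2 then some p.1 else none)) =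
      l.filter (fun n => q (digit_sum n)) := by
  induction l with
  | nil => rfl
  | cons x rest ih =>
    simp only [List.map_cons, List.zip_cons_cons, List.filterMap_cons, List.filter_cons]
    by_cases h : q (digit_sum x) <;> simp [h, ih]

-- ===== VERDICT (by name: the statement is the Claim_ definition above) =====
theorem check_if_sum_of_each_digits_is_a_prime_number_spec : Claim_equal_check_if_sum_of_each_digits_is_a_prime_number := by
  intro numbers _
  show check_if_sum_of_each_digits_is_a_prime_number numbers
      = check_if_sum_of_each_digits_is_a_prime_number_alt numbers
  simp only [check_if_sum_of_each_digits_is_a_prime_number,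
    check_if_sum_of_each_digits_is_a_prime_number_alt]
  cases numbers with
  | nil => rfl
  | cons x rest =>
    rw [PySem.List.foldl_append_if_eq_filter]
    simp only [List.nil_append, List.map_cons, List.isEmpty_cons, Bool.false_eq_true,
      if_false, PySem.List.max?_id_cons, Option.getD_some]
    rw [show (List.filterMap
          (fun p : Int × Int =>
            if (sieve (List.foldl max (digit_sum x) (List.map digit_sum rest))).getD p.2.toNat false
            then some p.1 else none)
          ((x :: rest).zip (digit_sum x :: List.map digit_sum rest)))
        = List.filter
            (fun n => (sieve (List.foldl max (digit_sum x) (List.map digit_sum rest))).getD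
              (digit_sum n).toNat false) (x :: rest)
        from zip_filterMap_eq_filter (x :: rest)
          (fun s => (sieve (List.foldl max (digit_sum x) (List.map digit_sum rest))).getD s.toNat false)]
    apply List.filter_congr
    intro n hn
    have hM := PySem.List.max?_id_cons (digit_sum x) (List.map digit_sum rest)
    have hmem : digit_sum n ∈ digit_sum x :: List.map digit_sum rest := by
      rw [show digit_sum x :: List.map digit_sum rest = List.map digit_sum (x :: rest) from rfl]
      exact List.mem_map_of_mem hn
    have hle : digit_sum n ≤ List.foldl max (digit_sum x) (List.map digit_sum rest) :=
      PySem.List.max?_isMax hM _ hmem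
    rw [dsumLoop_eq, zero_add, List.getD_eq_getElem?_getD,
        sieve_get _ _ (digit_sum_nonneg n) hle]
    rfl
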